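-- pv_equiv track=rewrite | github.com/vafle228/RGD-programming | test.py | create_parents
-- ===== SOURCE A (Python) =====
-- def create_parents(graph):
--     parents = {}
--     for node in list(graph.keys())[1::]:
--         if node in list(graph[list(graph.keys())[0]].keys()):
--             parents[node] = list(graph.keys())[0]
--         else:
--             parents[node] = None
--     return parents
-- ===== SOURCE B (Python) =====
-- def create_parents(graph):
--     keys = list(graph.keys())
--     parents = {n: None for n in keys[1:]}
--     if keys:
--         root = keys[0]
--         for nb in graph[root]:
--             if nb in parents:
--                 parents[nb] = root
--     return parents
-- ===== Notes on version B (the rewrite author's own statement) =====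
-- stated objective: faster
-- what changed: B builds the parents dict once with every non-root key set to None and then iterates over the root's adjacency list, mutating matching entries, instead of A's per-node membership scan of the root's key list (which A also rebuilds on every iteration).
import Mathlib
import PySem

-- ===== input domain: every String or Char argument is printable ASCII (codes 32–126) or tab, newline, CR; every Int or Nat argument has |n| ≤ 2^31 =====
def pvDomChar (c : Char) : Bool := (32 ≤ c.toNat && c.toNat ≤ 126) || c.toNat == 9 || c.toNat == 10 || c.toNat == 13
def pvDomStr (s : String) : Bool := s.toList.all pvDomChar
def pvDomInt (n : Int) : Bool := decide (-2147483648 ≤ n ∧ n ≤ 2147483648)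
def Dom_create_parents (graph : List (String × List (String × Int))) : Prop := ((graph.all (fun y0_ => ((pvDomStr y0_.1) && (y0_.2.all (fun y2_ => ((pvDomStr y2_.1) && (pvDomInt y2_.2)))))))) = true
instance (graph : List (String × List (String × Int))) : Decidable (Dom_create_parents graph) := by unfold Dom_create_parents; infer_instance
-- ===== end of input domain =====

-- B initializes every non-root key to None once and then walks only the root's adjacency,
-- mutating matching entries, instead of A's per-node membership test against the root's keys (objective: faster — one pass over the adjacency instead of a per-node scan).

-- ===== PORT A =====
-- the Python parameter is a dict: its association-list representation is normalised by Dict.ofList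
def create_parents (graph : List (String × List (String × Int))) : List (String × Option String) :=
  let g := PySem.Dict.ofList graph
  -- for node in list(graph.keys())[1::]: … (keys[0] / graph[keys[0]] recomputed in the body, as in A;
  -- headD "" / getD [] are only reached when keys is nonempty / the key is present)
  let parents := (g.keys.drop 1).foldl
    (fun parents node =>
      if node ∈ (PySem.Dict.ofList (g.getD (g.keys.headD "") [])).keys then
        parents.insert node (some (g.keys.headD ""))
      else
        parents.insert node (none : Option String))
    PySem.Dict.empty
  parents.items

-- ===== PORT B =====
def create_parents_alt (graph : List (String × List (String × Int))) : List (String × Option String) :=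
  let g := PySem.Dict.ofList graph
  let keys := g.keys
  -- parents = {n: None for n in keys[1:]}
  let parents := (keys.drop 1).foldl (fun d n => d.insert n (none : Option String)) PySem.Dict.empty
  let parents :=
    match keys with
    | [] => parents
    | root :: _ =>
      -- for nb in graph[root]: if nb in parents: parents[nb] = root
      (PySem.Dict.ofList (g.getD root [])).keys.foldl
        (fun d nb => if d.contains nb then d.insert nb (some root) else d) parents
  parents.items

-- ===== PRECONDITION & SPEC =====
def Spec_create_parents (graph : List (String × List (String × Int))) (out : List (String × Option String)) : Prop := out = create_parents_alt graph
instance (graph : List (String × List (String × Int))) (out : List (String × Option String)) : Decidable (Spec_create_parents graph out) := by unfold Spec_create_parents; infer_instance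

-- ===== CLAIM (what is proved, stated in full; the proofs are below) =====
def Claim_equal_create_parents : Prop := ∀ (graph : List (String × List (String × Int))), Dom_create_parents graph → Spec_create_parents graph (create_parents graph)

-- ===== LEMMAS AND PROOFS =====

-- A's loop inserts only fresh, distinct keys: its items are a map over the iterated keys.
theorem pv_fresh_items (l : List String) (hl : l.Nodup) (v : String → Option String) :
    ((l.foldl (fun d n => d.insert n (v n)) PySem.Dict.empty).items)
      = l.map (fun n => (n, v n)) := by
  have := PySem.Dict.items_foldl_insert_fresh (l := l) (k := id) (v := v)
      (d := (PySem.Dict.empty : PySem.Dict String (Option String)))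
      (by intro a _; simp [PySem.Dict.contains_empty]) (by simpa using hl)
  simpa [PySem.Dict.empty] using this

-- B's update loop on a dict whose items are a map over nodup keys rewrites values in place.
theorem pv_update_items (root : String) (xs : List String) :
    ∀ (l : List String) (f : String → Option String), l.Nodup →
    ((xs.foldl (fun d nb => if d.contains nb then d.insert nb (some root) else d)
        (PySem.Dict.mk (l.map (fun n => (n, f n))))).items)
      = l.map (fun n => (n, if n ∈ xs then some root else f n)) := by
  induction xs with
  | nil => intro l f _; simp
  | cons x xs ih =>
    intro l f hl
    by_cases hx : x ∈ l
    · have hc : (PySem.Dict.mk (l.map (fun n => (n, f n)))).contains x = true := by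
        simp [PySem.Dict.contains_eq_decide_mem_keys, PySem.Dict.keys, hx]
      have hitems :
          ((PySem.Dict.mk (l.map (fun n => (n, f n)))).insert x (some root)).items
            = l.map (fun n => (n, if n = x then some root else f n)) := by
        rw [PySem.Dict.items_insert_of_contains _ _ hc]
        simp only [List.map_map]
        refine List.map_congr_left ?_
        intro n hn
        by_cases h : n = x <;> simp [h]
      have hmk : ((PySem.Dict.mk (l.map (fun n => (n, f n)))).insert x (some root))
            = PySem.Dict.mk (l.map (fun n => (n, if n = x then some root else f n))) := by
        apply PySem.Dict.ext; simpa using hitems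
      rw [List.foldl_cons, if_pos hc, hmk, ih l _ hl]
      refine List.map_congr_left ?_
      intro n hn
      by_cases h1 : n ∈ xs <;> by_cases h2 : n = x <;> simp [h1, h2]
    · have hc : (PySem.Dict.mk (l.map (fun n => (n, f n)))).contains x = false := by
        simp [PySem.Dict.contains_eq_decide_mem_keys, PySem.Dict.keys, hx]
      rw [List.foldl_cons, if_neg (by simp [hc]), ih l f hl]
      refine List.map_congr_left ?_
      intro n hn
      have hnx : n ≠ x := fun h => hx (h ▸ hn)
      by_cases h1 : n ∈ xs <;> simp [h1, hnx]

theorem pv_keys_nodup (graph : List (String × List (String × Int))) :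
    (PySem.Dict.ofList graph).keys.Nodup := PySem.Dict.nodup_keys_ofList graph

-- ===== VERDICT (by name: the statement is the Claim_ definition above) =====
theorem create_parents_spec : Claim_equal_create_parents := by
  intro graph _
  show create_parents graph = create_parents_alt graph
  unfold create_parents create_parents_alt
  have hnd := pv_keys_nodup graph
  cases hk : (PySem.Dict.ofList graph).keys with
  | nil => simp [hk]
  | cons root rest =>
    have hrest : rest.Nodup := by rw [hk] at hnd; exact hnd.of_cons
    simp only [hk, List.drop_succ_cons, List.drop_zero, List.headD_cons]
    rw [show (fun (parents : PySem.Dict String (Option String)) node =>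
          if node ∈ (PySem.Dict.ofList ((PySem.Dict.ofList graph).getD root [])).keys then
            parents.insert node (some root)
          else parents.insert node none)
        = (fun (parents : PySem.Dict String (Option String)) n =>
            parents.insert n (if n ∈ (PySem.Dict.ofList ((PySem.Dict.ofList graph).getD root [])).keys
                              then some root else none)) from by
          funext p n; split <;> rfl]
    rw [pv_fresh_items rest hrest
        (fun n => if n ∈ (PySem.Dict.ofList ((PySem.Dict.ofList graph).getD root [])).keys
                  then some root else none)]
    · have hmk : (rest.foldl (fun d n => d.insert n (none : Option String)) PySem.Dict.empty)
          = PySem.Dict.mk (rest.map (fun n => (n, (fun _ => (none : Option String)) n))) := by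
        apply PySem.Dict.ext
        simpa using pv_fresh_items rest hrest (fun _ => (none : Option String))
      have hB := pv_update_items root
        ((PySem.Dict.ofList ((PySem.Dict.ofList graph).getD root [])).keys)
        rest (fun _ => (none : Option String)) hrest
      rw [hmk, hB]
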